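-- pv_equiv track=rewrite | github.com/samuelbozac/talanaKombat | app/combat/utils.py | intercalate_messages
-- ===== SOURCE A (Python) =====
-- def intercalate_messages(messages1: list[str], messages2: list[str]) -> list[str]:  # noqa: E501
--     intercalated_messages = []
--     zip_messages = zip(messages1, messages2,)
--     for x, y in zip_messages:
--         intercalated_messages.append(x)
--         intercalated_messages.append(y)
--
--     if len(messages1) < len(messages2):
--         intercalated_messages.extend(
--             messages2[len(messages1):]
--         )
--     elif len(messages1) > len(messages2):
--         intercalated_messages.extend(
--             messages1[len(messages2):]
--         )
--     return intercalated_messages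
-- ===== SOURCE B (Python) =====
-- def intercalate_messages(messages1: list[str], messages2: list[str]) -> list[str]:
--     # One index-driven pass: no zip, no length comparison, no slicing.
--     out = []
--     for i in range(max(len(messages1), len(messages2))):
--         if i < len(messages1):
--             out.append(messages1[i])
--         if i < len(messages2):
--             out.append(messages2[i])
--     return out
-- ===== Notes on version B (the rewrite author's own statement) =====
-- stated objective: alternative
-- what changed: Replaced the zip loop plus the length-comparison/slice remainder logic by a single index-driven pass over range(max(len1,len2)) with two guarded appends, eliminating zip, the branch on lengths and the slice entirely.
import Mathlib
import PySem

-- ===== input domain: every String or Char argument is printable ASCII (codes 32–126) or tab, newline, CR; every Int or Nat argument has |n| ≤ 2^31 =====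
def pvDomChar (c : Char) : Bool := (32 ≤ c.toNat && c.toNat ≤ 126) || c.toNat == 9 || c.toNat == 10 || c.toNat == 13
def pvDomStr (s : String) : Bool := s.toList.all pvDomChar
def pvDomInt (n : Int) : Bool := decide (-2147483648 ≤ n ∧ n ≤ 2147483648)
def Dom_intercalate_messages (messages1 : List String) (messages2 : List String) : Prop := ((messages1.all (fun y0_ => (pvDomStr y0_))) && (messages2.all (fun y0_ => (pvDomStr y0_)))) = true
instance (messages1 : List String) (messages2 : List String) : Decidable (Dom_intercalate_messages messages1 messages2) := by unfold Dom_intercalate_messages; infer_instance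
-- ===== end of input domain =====

-- B replaces A's zip-loop + length-comparison/slice remainder handling by one index-driven
-- pass over range(max(len1,len2)) with two guarded appends (alternative decomposition, same output).


-- ===== PORT A =====
def intercalate_messages (messages1 : List String) (messages2 : List String) : List String :=
  let intercalated := (messages1.zip messages2).foldl
    (fun acc xy => (acc ++ [xy.1]) ++ [xy.2]) []
  if messages1.length < messages2.length then
    intercalated ++ PySem.List.slice messages2 (some (messages1.length : Int)) none
  else if messages2.length < messages1.length then
    intercalated ++ PySem.List.slice messages1 (some (messages2.length : Int)) none
  else
    intercalated

-- ===== PORT B =====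
def intercalate_messages_alt (messages1 : List String) (messages2 : List String) : List String :=
  (PySem.List.pyRange 0 ((max messages1.length messages2.length : Nat) : Int)).foldl
    (fun out i =>
      let out1 := if i < (messages1.length : Int)
        then out ++ [PySem.List.pyGetD messages1 i ""] else out
      if i < (messages2.length : Int)
        then out1 ++ [PySem.List.pyGetD messages2 i ""] else out1)
    []

-- ===== PRECONDITION & SPEC =====
def Spec_intercalate_messages (messages1 : List String) (messages2 : List String) (out : List String) : Prop := out = intercalate_messages_alt messages1 messages2
instance (messages1 : List String) (messages2 : List String) (out : List String) : Decidable (Spec_intercalate_messages messages1 messages2 out) := by unfold Spec_intercalate_messages; infer_instance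

-- ===== CLAIM (what is proved, stated in full; the proofs are below) =====
def Claim_equal_intercalate_messages : Prop := ∀ (messages1 : List String) (messages2 : List String), Dom_intercalate_messages messages1 messages2 → Spec_intercalate_messages messages1 messages2 (intercalate_messages messages1 messages2)

-- ===== LEMMAS AND PROOFS =====

-- common reference interleaving, used only by the proofs
def pvInter : List String → List String → List String
  | [], m2 => m2
  | m1, [] => m1
  | x :: t1, y :: t2 => x :: y :: pvInter t1 t2

theorem pvFoldl_out (l : List (String × String)) :
    ∀ (a : List String),
      l.foldl (fun acc xy => acc ++ [xy.1] ++ [xy.2]) a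
        = a ++ l.foldl (fun acc xy => acc ++ [xy.1] ++ [xy.2]) [] := by
  induction l with
  | nil => intro a; simp
  | cons p t ih =>
    intro a
    simp only [List.foldl_cons]
    rw [ih, ih ([] ++ [p.1] ++ [p.2])]
    simp [List.append_assoc]

theorem pvA_eq_inter :
    ∀ (messages1 messages2 : List String),
      intercalate_messages messages1 messages2 = pvInter messages1 messages2 := by
  intro m1
  induction m1 with
  | nil =>
    intro m2
    cases m2 with
    | nil => rfl
    | cons y t2 => simp [intercalate_messages, pvInter]
  | cons x t1 ih =>
    intro m2
    cases m2 with
    | nil => simp [intercalate_messages, pvInter]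
    | cons y t2 =>
      have h := ih t2
      simp only [intercalate_messages, pvInter] at h ⊢
      rw [List.zip_cons_cons, List.foldl_cons, pvFoldl_out]
      simp only [List.length_cons, List.nil_append]
      rw [PySem.List.slice_from_natCast (xs := y :: t2) (a := t1.length + 1),
          PySem.List.slice_from_natCast (xs := x :: t1) (a := t2.length + 1)]
      rw [PySem.List.slice_from_natCast (a := t1.length),
          PySem.List.slice_from_natCast (a := t2.length)] at h
      simp only [List.drop_succ_cons]
      by_cases hlt : t1.length < t2.length
      · simp only [hlt, if_true, if_pos (by omega : t1.length + 1 < t2.length + 1)] at h ⊢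
        rw [List.append_assoc, h]; simp
      · by_cases hgt : t2.length < t1.length
        · simp only [if_neg (by omega : ¬ t1.length + 1 < t2.length + 1),
                     if_pos (by omega : t2.length + 1 < t1.length + 1),
                     if_neg hlt, if_pos hgt] at h ⊢
          rw [List.append_assoc, h]; simp
        · simp only [if_neg (by omega : ¬ t1.length + 1 < t2.length + 1),
                     if_neg (by omega : ¬ t2.length + 1 < t1.length + 1),
                     if_neg hlt, if_neg hgt] at h ⊢
          rw [h]; simp

-- the Nat-level body of B's loop
def pvF (m1 m2 : List String) (out : List String) (i : Nat) : List String :=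
  out ++ ((if i < m1.length then [m1.getD i ""] else [])
       ++ (if i < m2.length then [m2.getD i ""] else []))

theorem pvMapGetD :
    ∀ (l : List String), (List.range l.length).map (fun i => l.getD i "") = l := by
  intro l
  induction l with
  | nil => simp
  | cons x t ih =>
    simp only [List.length_cons, List.range_succ_eq_map, List.map_cons, List.map_map]
    simpa using ih

theorem pvFoldl_F :
    ∀ (m1 m2 : List String) (acc : List String),
      (List.range (max m1.length m2.length)).foldl (pvF m1 m2) acc
        = acc ++ pvInter m1 m2 := by
  intro m1
  induction m1 with
  | nil =>
    intro m2 acc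
    have hc : ∀ (a : List String), ∀ i ∈ List.range (max ([] : List String).length m2.length),
        pvF [] m2 a i = a ++ [m2.getD i ""] := by
      intro a i hi
      simp only [List.mem_range, List.length_nil, Nat.max_eq_right (Nat.zero_le _)] at hi
      simp [pvF, hi]
    rw [PySem.List.foldl_congr_mem _ _ _ _ hc]
    rw [PySem.List.foldl_append_singleton_eq_map,
        show List.range (max ([] : List String).length m2.length)
          = List.range m2.length by simp, pvMapGetD]
    simp [pvInter]
  | cons x t1 ih =>
    intro m2 acc
    cases m2 with
    | nil =>
      have hc : ∀ (a : List String), ∀ i ∈ List.range (max (x :: t1).length ([] : List String).length),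
          pvF (x :: t1) [] a i = a ++ [(x :: t1).getD i ""] := by
        intro a i hi
        simp only [List.mem_range, List.length_nil, Nat.max_eq_left (Nat.zero_le _)] at hi
        have hi' : i < t1.length + 1 := by simpa using hi
        simp [pvF, hi']
      rw [PySem.List.foldl_congr_mem _ _ _ _ hc]
      rw [PySem.List.foldl_append_singleton_eq_map]
      have hlen : (x :: t1).length = t1.length + 1 := rfl
      rw [show List.range (max (x :: t1).length ([] : List String).length)
            = List.range (x :: t1).length by simp, pvMapGetD]
      have : pvInter (x :: t1) [] = x :: t1 := rfl
      simp [this]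
    | cons y t2 =>
      have hmax : max (x :: t1).length (y :: t2).length = max t1.length t2.length + 1 := by
        simp [List.length_cons, Nat.succ_max_succ]
      rw [hmax, List.range_succ_eq_map, List.foldl_cons, List.foldl_map]
      have hstep : ∀ (a : List String), ∀ i ∈ List.range (max t1.length t2.length),
          pvF (x :: t1) (y :: t2) a i.succ = pvF t1 t2 a i := by
        intro a i _
        simp [pvF]
      rw [PySem.List.foldl_congr_mem _ _ _ _ hstep, ih]
      have h0 : pvF (x :: t1) (y :: t2) acc 0 = acc ++ [x, y] := by
        simp [pvF]
      rw [h0]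
      simp [pvInter]

theorem pvB_eq_inter :
    ∀ (messages1 messages2 : List String),
      intercalate_messages_alt messages1 messages2 = pvInter messages1 messages2 := by
  intro m1 m2
  have hrange := PySem.List.pyRange_zero_natCast (max m1.length m2.length)
  simp only [intercalate_messages_alt]
  rw [hrange, List.foldl_map]
  have hcongr : ∀ (a : List String), ∀ i ∈ List.range (max m1.length m2.length),
      (fun (out : List String) (j : Int) =>
        let out1 := if j < (m1.length : Int) then out ++ [PySem.List.pyGetD m1 j ""] else out
        if j < (m2.length : Int) then out1 ++ [PySem.List.pyGetD m2 j ""] else out1) a (i : Int)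
        = pvF m1 m2 a i := by
    intro a i _
    simp only [pvF, PySem.List.pyGetD_natCast, Nat.cast_lt]
    by_cases h1 : i < m1.length <;> by_cases h2 : i < m2.length <;>
      simp [h1, h2, List.append_assoc]
  rw [PySem.List.foldl_congr_mem _ _ _ _ hcongr, pvFoldl_F]
  simp

-- ===== VERDICT (by name: the statement is the Claim_ definition above) =====
theorem intercalate_messages_spec : Claim_equal_intercalate_messages := by
  intro m1 m2 _
  show _ = _
  rw [pvA_eq_inter, pvB_eq_inter]
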